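-- pv_equiv track=rewrite | github.com/nttung2603/Vietnamese-Text-Normalization-with-Limited-Data-for-Fast-Deployment-in-Text-to-Speech-Systems | utils/normalize.py | number_2_word
-- ===== SOURCE A (Python) =====
-- spell_digit = {'0': 'không', '1': 'một', '2': 'hai', '3': 'ba', '4': 'bốn',
--                '5': 'năm', '6': 'sáu', '7': 'bảy', '8': 'tám', '9': 'chín'}
--
-- def number_2_word(token_unnorm):
--     n = int(token_unnorm)
--     # If all the digits are encountered return blank string
--     if(n==0):
--         return ""
--
--     else:
--         # compute spelling for the last digit
--         small_ans = spell_digit[str(int(n%10))]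
--
--         # keep computing for the previous digits and add the spelling for the last digit
--         ans = number_2_word(int(n/10)) + small_ans + " "
--
--     # Return the final answer
--     return ans
-- ===== SOURCE B (Python) =====
-- def number_2_word(token_unnorm):
--     n = int(token_unnorm)
--     # stage 1: collect the decimal digits (Python %, truncating int(n/10)) least-significant first
--     digits = []
--     while n != 0:
--         digits.append(n % 10)
--         n = int(n / 10)
--     # stage 2: map each digit through an indexed word table, most-significant first
--     words = ['không', 'một', 'hai', 'ba', 'bốn', 'năm', 'sáu', 'bảy', 'tám', 'chín']
--     return "".join(words[d] + " " for d in reversed(digits))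
-- ===== Notes on version B (the rewrite author's own statement) =====
-- stated objective: alternative
-- what changed: Replaces A's recursion through a string-keyed dict with a two-stage iterative version: a loop collects the integer digits least-significant first, then the words are produced by list indexing over the reversed digit list and joined.
import Mathlib
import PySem

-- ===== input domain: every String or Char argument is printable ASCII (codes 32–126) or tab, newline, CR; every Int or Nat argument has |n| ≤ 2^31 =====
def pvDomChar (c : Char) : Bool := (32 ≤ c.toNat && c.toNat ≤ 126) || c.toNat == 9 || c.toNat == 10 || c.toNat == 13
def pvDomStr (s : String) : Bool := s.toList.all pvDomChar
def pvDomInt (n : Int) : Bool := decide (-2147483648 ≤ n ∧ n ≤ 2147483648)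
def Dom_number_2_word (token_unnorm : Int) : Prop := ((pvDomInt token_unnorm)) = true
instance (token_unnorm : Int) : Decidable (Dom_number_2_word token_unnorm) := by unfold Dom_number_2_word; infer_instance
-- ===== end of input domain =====

-- B replaces A's dict-lookup recursion by two iterative stages: collect integer digits, then map them
-- through an indexed word list (objective: alternative decomposition).
-- NOTE on `int(n/10)`: for |n| ≤ 2^31 Python's float division is exact, so int(n/10) is truncating
-- integer division; both ports use Int.tdiv, exact on the stated domain.
-- Both loops strictly shrink |n|, so fuel = |n|+1 is a pure totalization device (never exhausted).

-- ===== PORT A =====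
def pySpellDigitA : PySem.Dict String String :=
  PySem.Dict.ofList [("0", "không"), ("1", "một"), ("2", "hai"), ("3", "ba"), ("4", "bốn"),
                     ("5", "năm"), ("6", "sáu"), ("7", "bảy"), ("8", "tám"), ("9", "chín")]

-- literal transliteration of A's recursion; the dict key str(int(n%10)) is always one of
-- "0".."9", so get? is always some: `.getD ""` only totalizes the lookup.
def numberGoA : Nat → Int → String
  | 0, _ => ""
  | fuel + 1, n =>
    if n = 0 then ""
    else
      let small_ans := (pySpellDigitA.get? (PySem.Int.toStr (PySem.Int.mod n 10))).getD ""
      numberGoA fuel (Int.tdiv n 10) ++ small_ans ++ " "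

def number_2_word (token_unnorm : Int) : String :=
  numberGoA (token_unnorm.natAbs + 1) token_unnorm

-- ===== PORT B =====
-- Source B stage 1: the while-loop collecting the integer digits, least-significant first
def collectDigits : Nat → Int → List Int
  | 0, _ => []
  | fuel + 1, n =>
    if n = 0 then []
    else PySem.Int.mod n 10 :: collectDigits fuel (Int.tdiv n 10)

-- Source B stage 2: the word table; words[d] is always in range, `.getD ""` only totalizes it
def pyWords : List String :=
  ["không", "một", "hai", "ba", "bốn", "năm", "sáu", "bảy", "tám", "chín"]

def number_2_word_alt (token_unnorm : Int) : String :=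
  String.join ((collectDigits (token_unnorm.natAbs + 1) token_unnorm).reverse.map
    (fun d => (PySem.List.pyGet? pyWords d).getD "" ++ " "))

-- ===== PRECONDITION & SPEC =====
def Spec_number_2_word (token_unnorm : Int) (out : String) : Prop := out = number_2_word_alt token_unnorm
instance (token_unnorm : Int) (out : String) : Decidable (Spec_number_2_word token_unnorm out) := by unfold Spec_number_2_word; infer_instance

-- ===== CLAIM =====
def Claim_equal_number_2_word : Prop := ∀ (token_unnorm : Int), Dom_number_2_word token_unnorm → Spec_number_2_word token_unnorm (number_2_word token_unnorm)

-- ===== LEMMAS AND PROOFS =====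
theorem join_append_singleton (l : List String) (x : String) :
    String.join (l ++ [x]) = String.join l ++ x := by
  induction l with
  | nil => simp [String.join]
  | cons h t ih => simp [String.join]

theorem natAbs_tdiv_ten (n : Int) : (Int.tdiv n 10).natAbs = n.natAbs / 10 := by
  rw [Int.natAbs_tdiv]; rfl

-- the two per-digit lookups agree: A's str-keyed dict vs B's indexed list
theorem lookup_eq (n : Int) :
    (pySpellDigitA.get? (PySem.Int.toStr (PySem.Int.mod n 10))).getD "" =
      (PySem.List.pyGet? pyWords (PySem.Int.mod n 10)).getD "" := by
  have h1 : 0 ≤ PySem.Int.mod n 10 := PySem.Int.mod_nonneg n (by omega)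
  have h2 : PySem.Int.mod n 10 < 10 := PySem.Int.mod_lt n (by omega)
  set d := PySem.Int.mod n 10 with hd
  interval_cases d <;> decide

theorem go_eq (fuel : Nat) :
    ∀ (n : Int), n.natAbs < fuel →
      numberGoA fuel n =
        String.join ((collectDigits fuel n).reverse.map
          (fun d => (PySem.List.pyGet? pyWords d).getD "" ++ " ")) := by
  induction fuel with
  | zero => intro n hn; omega
  | succ k ih =>
    intro n hn
    by_cases h0 : n = 0
    · subst h0; simp [numberGoA, collectDigits, String.join]
    · have habs : 0 < n.natAbs := by
        have := Int.natAbs_eq_zero.mp.mt h0; omega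
      have hlt : (Int.tdiv n 10).natAbs < k := by
        rw [natAbs_tdiv_ten]; omega
      rw [numberGoA, collectDigits]
      simp only [h0, ite_false, List.reverse_cons, List.map_append, List.map_cons,
        List.map_nil, join_append_singleton]
      rw [ih (Int.tdiv n 10) hlt, lookup_eq n]
      simp [String.append_assoc]

-- ===== VERDICT =====
theorem number_2_word_spec : Claim_equal_number_2_word := by
  intro n _
  exact go_eq (n.natAbs + 1) n (by omega)
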